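-- pv_equiv track=rewrite | github.com/hirokisaito10969/AtCoder | 300/300D.py | count_prime_combinations
-- ===== SOURCE A (Python) =====
-- def sieve_of_eratosthenes(n):
--     primes = [True] * (n + 1)
--     primes[0] = primes[1] = False
--     p = 2
--     while p * p <= n:
--         if primes[p]:
--             for i in range(p * p, n + 1, p):
--                 primes[i] = False
--         p += 1
--     return [i for i in range(n + 1) if primes[i]]
--
-- def count_prime_combinations(n):
--     primes = sieve_of_eratosthenes(n)
--     count = 0
--     for i in range(len(primes)):
--         a = primes[i]
--         for j in range(i + 1, len(primes)):
--             b = primes[j]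
--             for k in range(j + 1, len(primes)):
--                 c = primes[k]
--                 if a ** 2 * b * c ** 2 > n:
--                     break
--                 count += 1
--     return count
-- ===== SOURCE B (Python) =====
-- def sieve_of_eratosthenes(n):
--     primes = [True] * (n + 1)
--     primes[0] = primes[1] = False
--     p = 2
--     while p * p <= n:
--         if primes[p]:
--             for i in range(p * p, n + 1, p):
--                 primes[i] = False
--         p += 1
--     return [i for i in range(n + 1) if primes[i]]
--
-- def count_prime_combinations(n):
--     primes = sieve_of_eratosthenes(n)
--     m = len(primes)
--     count = 0
--     for i in range(m):
--         a2 = primes[i] * primes[i]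
--         for j in range(i + 1, m):
--             b = primes[j]
--             if j + 1 < m and a2 * b * primes[j + 1] * primes[j + 1] > n:
--                 break  # even the smallest candidate c fails; larger b only worse
--             lo, hi = j + 1, m
--             while lo < hi:
--                 mid = (lo + hi) // 2
--                 c = primes[mid]
--                 if a2 * b * c * c <= n:
--                     lo = mid + 1
--                 else:
--                     hi = mid
--             count += lo - (j + 1)
--     return count
-- ===== Notes on version B (the rewrite author's own statement) =====
-- stated objective: faster
-- what changed: B keeps the sieve but replaces A's triple nested scan: B enumerates only the (a,b) pairs that can still contribute (breaking the b-loop as soon as even the smallest candidate c fails) and counts the valid c's by a hand-written binary search instead of A's inner linear scan.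
-- outside the precondition, e.g. on count_prime_combinations(0): A raises IndexError, B raises IndexError
import Mathlib
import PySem

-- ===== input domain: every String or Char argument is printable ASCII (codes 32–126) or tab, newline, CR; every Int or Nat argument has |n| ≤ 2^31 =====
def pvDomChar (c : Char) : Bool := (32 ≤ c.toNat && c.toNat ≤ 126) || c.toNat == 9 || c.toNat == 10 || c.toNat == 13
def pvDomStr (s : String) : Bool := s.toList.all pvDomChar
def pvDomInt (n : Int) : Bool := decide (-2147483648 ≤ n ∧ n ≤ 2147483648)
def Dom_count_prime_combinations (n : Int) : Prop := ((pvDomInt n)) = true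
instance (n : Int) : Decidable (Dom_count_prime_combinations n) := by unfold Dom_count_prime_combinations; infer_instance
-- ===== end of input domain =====

-- B keeps A's sieve but counts with break-pruned pair enumeration + binary search instead of a triple scan (objective: faster).

-- ===== PORT A =====
-- Source B's sieve_of_eratosthenes is textually identical to A's, so both ports share this helper.
-- while p * p <= n: … p += 1   (p*p ≤ n forces p ≤ n, see pvSieve_le below)
def pvSieveLoop (n : Int) (primes : List Bool) (p : Int) : List Bool :=
  if h : p * p ≤ n then
    let primes' := if primes.getD p.toNat false then
        -- for i in range(p*p, n+1, p): primes[i] = False   (indices are in range: p*p ≤ i ≤ n < len)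
        (PySem.List.pyRange (p * p) (n + 1) p).foldl (fun pr i => pr.set i.toNat false) primes
      else primes
    pvSieveLoop n primes' (p + 1)
  else primes
termination_by (n + 1 - p).toNat
decreasing_by
  have h2 : 2 * p ≤ n + 1 := by nlinarith [sq_nonneg (p - 1)]
  have h3 : 0 ≤ n := by nlinarith [sq_nonneg p]
  omega

def sieve_of_eratosthenes (n : Int) : List Int :=
  let primes := List.replicate (n + 1).toNat true
  -- primes[0] = primes[1] = False  (in range for n ≥ 1, which Pre_ guarantees)
  let primes := (primes.set 0 false).set 1 false
  let primes := pvSieveLoop n primes 2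
  (PySem.List.pyRange 0 (n + 1) 1).filter (fun i => primes.getD i.toNat false)

-- for k in range(j+1, len(primes)): c = primes[k]; if a**2*b*c**2 > n: break; count += 1
def pvInnerA (n a b : Int) (primes : List Int) (k : Nat) (count : Int) : Int :=
  if h : k < primes.length then
    let c := primes[k]
    if a ^ 2 * b * c ^ 2 > n then count
    else pvInnerA n a b primes (k + 1) (count + 1)
  else count
termination_by primes.length - k

def pvMiddleA (n a : Int) (primes : List Int) (j : Nat) (count : Int) : Int :=
  if h : j < primes.length then
    let b := primes[j]
    pvMiddleA n a primes (j + 1) (pvInnerA n a b primes (j + 1) count)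
  else count
termination_by primes.length - j

def pvOuterA (n : Int) (primes : List Int) (i : Nat) (count : Int) : Int :=
  if h : i < primes.length then
    let a := primes[i]
    pvOuterA n primes (i + 1) (pvMiddleA n a primes (i + 1) count)
  else count
termination_by primes.length - i

def count_prime_combinations (n : Int) : Int :=
  let primes := sieve_of_eratosthenes n
  pvOuterA n primes 0 0

-- ===== PORT B =====
-- while lo < hi: mid = (lo+hi)//2; c = primes[mid]; if a2*b*c*c <= n: lo = mid+1 else: hi = mid
def pvBisect (n a2 b : Int) (primes : List Int) (lo hi : Nat) : Nat :=
  if _h : lo < hi then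
    let mid := (lo + hi) / 2
    let c := primes.getD mid 0   -- mid < hi ≤ len at every call site
    if a2 * b * c * c ≤ n then pvBisect n a2 b primes (mid + 1) hi
    else pvBisect n a2 b primes lo mid
  else lo
termination_by hi - lo
decreasing_by all_goals omega

-- for j in range(i+1, m): … with the break and the binary search
def pvMiddleB (n a2 : Int) (primes : List Int) (j : Nat) (count : Int) : Int :=
  if h : j < primes.length then
    let b := primes[j]
    let c1 := primes.getD (j + 1) 0   -- read only when j+1 < m (Python short-circuit); getD is safe
    if j + 1 < primes.length ∧ a2 * b * c1 * c1 > n then count   -- break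
    else
      let lo := pvBisect n a2 b primes (j + 1) primes.length
      pvMiddleB n a2 primes (j + 1) (count + ((lo : Int) - ((j : Int) + 1)))
  else count
termination_by primes.length - j

def pvOuterB (n : Int) (primes : List Int) (i : Nat) (count : Int) : Int :=
  if h : i < primes.length then
    let a2 := primes[i] * primes[i]
    pvOuterB n primes (i + 1) (pvMiddleB n a2 primes (i + 1) count)
  else count
termination_by primes.length - i

def count_prime_combinations_alt (n : Int) : Int :=
  let primes := sieve_of_eratosthenes n
  pvOuterB n primes 0 0

-- ===== PRECONDITION & SPEC =====
-- Python A raises IndexError for n ≤ 0 (primes[1] on a list of length ≤ 1); so does B's identical sieve.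
def Pre_count_prime_combinations (n : Int) : Prop := 1 ≤ n
instance (n : Int) : Decidable (Pre_count_prime_combinations n) := by
  unfold Pre_count_prime_combinations; infer_instance
def pvWitness_count_prime_combinations : Int := 300

def Spec_count_prime_combinations (n : Int) (out : Int) : Prop := out = count_prime_combinations_alt n
instance (n : Int) (out : Int) : Decidable (Spec_count_prime_combinations n out) := by
  unfold Spec_count_prime_combinations; infer_instance

-- ===== CLAIM (what is proved, stated in full; the proofs are below) =====
def Claim_equal_count_prime_combinations : Prop := ∀ (n : Int), Dom_count_prime_combinations n → Pre_count_prime_combinations n → Spec_count_prime_combinations n (count_prime_combinations n)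


-- ===== LEMMAS AND PROOFS =====

def pvCnt (n a2 b : Int) (ps : List Int) (k : Nat) : Nat :=
  ((ps.drop k).takeWhile (fun c => decide (a2 * b * c * c ≤ n))).length

lemma pvInnerA_eq (n a b : Int) (ps : List Int) : ∀ (d k : Nat) (count : Int),
    ps.length - k ≤ d →
    pvInnerA n a b ps k count = count + (pvCnt n (a * a) b ps k : Int) := by
  intro d
  induction d with
  | zero =>
    intro k count hk
    unfold pvInnerA
    rw [dif_neg (by omega)]
    simp [pvCnt, List.drop_eq_nil_of_le (by omega : ps.length ≤ k)]
  | succ d ih =>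
    intro k count hk
    unfold pvInnerA
    by_cases h : k < ps.length
    · rw [dif_pos h]
      have hd : ps.drop k = ps[k] :: ps.drop (k + 1) := List.drop_eq_getElem_cons h
      have hxy : a ^ 2 * b * ps[k] ^ 2 = a * a * b * ps[k] * ps[k] := by ring
      by_cases hc : a ^ 2 * b * ps[k] ^ 2 > n
      · have hfail : ¬ (a * a * b * ps[k] * ps[k] ≤ n) := by rw [← hxy]; omega
        rw [if_pos hc]
        simp only [pvCnt, hd, List.takeWhile_cons, decide_eq_true_eq]
        rw [if_neg hfail]
        simp
      · have hok : a * a * b * ps[k] * ps[k] ≤ n := by rw [← hxy]; omega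
        rw [if_neg hc, ih (k + 1) (count + 1) (by omega)]
        simp only [pvCnt, hd, List.takeWhile_cons, decide_eq_true_eq]
        rw [if_pos hok]
        push_cast [List.length_cons]
        ring
    · rw [dif_neg h]
      simp [pvCnt, List.drop_eq_nil_of_le (by omega : ps.length ≤ k)]

-- the total contributed by all j' ≥ j
def pvGsum (n a2 : Int) (ps : List Int) (j : Nat) : Int :=
  if _h : j < ps.length then
    (pvCnt n a2 (ps.getD j 0) ps (j + 1) : Int) + pvGsum n a2 ps (j + 1)
  else 0
termination_by ps.length - j

-- takeWhile length from the index characterization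
lemma pvTW_len_eq {α : Type} (p : α → Bool) : ∀ (l : List α) (m : Nat), m ≤ l.length →
    (∀ i (h : i < l.length), i < m → p l[i] = true) →
    (∀ i (h : i < l.length), m ≤ i → p l[i] = false) →
    (l.takeWhile p).length = m := by
  intro l
  induction l with
  | nil =>
    intro m hm _ _
    simp only [List.length_nil] at hm
    simp only [List.takeWhile_nil, List.length_nil]
    omega
  | cons x xs ih =>
    intro m hm h1 h2
    cases m with
    | zero =>
      have hx : p x = false := h2 0 (by simp) (by omega)
      simp [hx]
    | succ m' =>
      have hx : p x = true := h1 0 (by simp) (by omega)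
      have := ih m' (by simpa using hm)
        (fun i hi him => h1 (i + 1) (by simpa using Nat.succ_lt_succ hi) (by omega))
        (fun i hi him => h2 (i + 1) (by simpa using Nat.succ_lt_succ hi) (by omega))
      simp [hx, this]

-- product monotonicity used for the break and for the binary search
lemma pvMono (n a2 b b' c c' : Int) (ha2 : 0 ≤ a2) (hb : 0 ≤ b) (hbb : b ≤ b')
    (hc : 0 ≤ c) (hcc : c ≤ c') (hle : a2 * b' * c' * c' ≤ n) : a2 * b * c * c ≤ n := by
  have hb' : 0 ≤ b' := le_trans hb hbb
  have hc' : 0 ≤ c' := le_trans hc hcc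
  have h1 : b * c ≤ b' * c' := mul_le_mul hbb hcc hc hb'
  have h2 : b * c * c ≤ b' * c' * c' :=
    mul_le_mul h1 hcc hc (mul_nonneg hb' hc')
  have h3 : a2 * (b * c * c) ≤ a2 * (b' * c' * c') := mul_le_mul_of_nonneg_left h2 ha2
  calc a2 * b * c * c = a2 * (b * c * c) := by ring
    _ ≤ a2 * (b' * c' * c') := h3
    _ = a2 * b' * c' * c' := by ring
    _ ≤ n := hle

lemma pvSorted_getD_mono (ps : List Int) (hs : ps.Pairwise (· ≤ ·)) (j k : Nat)
    (hjk : j ≤ k) (hk : k < ps.length) : ps.getD j 0 ≤ ps.getD k 0 := by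
  rcases Nat.eq_or_lt_of_le hjk with rfl | hlt
  · exact le_refl _
  · rw [List.getD_eq_getElem ps 0 (by omega), List.getD_eq_getElem ps 0 hk]
    exact (List.pairwise_iff_getElem.mp hs) j k (by omega) hk hlt

lemma pvBisect_eq (n a2 b : Int) (ps : List Int)
    (hmono : ∀ j k : Nat, j ≤ k → k < ps.length →
      a2 * b * ps.getD k 0 * ps.getD k 0 ≤ n → a2 * b * ps.getD j 0 * ps.getD j 0 ≤ n)
    (s : Nat) :
    ∀ (d lo hi : Nat), hi - lo ≤ d → s ≤ lo → lo ≤ hi → hi ≤ ps.length →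
    (∀ k, s ≤ k → k < lo → a2 * b * ps.getD k 0 * ps.getD k 0 ≤ n) →
    (∀ k, hi ≤ k → k < ps.length → ¬ a2 * b * ps.getD k 0 * ps.getD k 0 ≤ n) →
    s ≤ pvBisect n a2 b ps lo hi ∧ pvBisect n a2 b ps lo hi ≤ ps.length ∧
    (∀ k, s ≤ k → k < pvBisect n a2 b ps lo hi → a2 * b * ps.getD k 0 * ps.getD k 0 ≤ n) ∧
    (∀ k, pvBisect n a2 b ps lo hi ≤ k → k < ps.length →
      ¬ a2 * b * ps.getD k 0 * ps.getD k 0 ≤ n) := by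
  intro d
  induction d with
  | zero =>
    intro lo hi hd hslo hlohi hhil h1 h2
    have : ¬ lo < hi := by omega
    unfold pvBisect
    rw [dif_neg this]
    exact ⟨hslo, by omega, h1, fun k hk1 hk2 => h2 k (by omega) hk2⟩
  | succ d ih =>
    intro lo hi hd hslo hlohi hhil h1 h2
    unfold pvBisect
    by_cases h : lo < hi
    · rw [dif_pos h]
      by_cases hc : a2 * b * ps.getD ((lo + hi) / 2) 0 * ps.getD ((lo + hi) / 2) 0 ≤ n
      · rw [if_pos hc]
        exact ih ((lo + hi) / 2 + 1) hi (by omega) (by omega) (by omega) hhil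
          (fun k hsk hkm => hmono k ((lo + hi) / 2) (by omega) (by omega) hc) h2
      · rw [if_neg hc]
        exact ih lo ((lo + hi) / 2) (by omega) hslo (by omega) (by omega) h1
          (fun k hmk hkl hq => hc (hmono ((lo + hi) / 2) k hmk hkl hq))
    · rw [dif_neg h]
      have : lo = hi := by omega
      subst this
      exact ⟨hslo, by omega, h1, h2⟩

lemma pvBisect_cnt (n a2 b : Int) (ps : List Int) (hs : ps.Pairwise (· ≤ ·))
    (h0 : ∀ x ∈ ps, 0 ≤ x) (ha2 : 0 ≤ a2) (hb : 0 ≤ b) (s : Nat) (hsl : s ≤ ps.length) :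
    pvBisect n a2 b ps s ps.length = s + pvCnt n a2 b ps s := by
  have hmono : ∀ j k : Nat, j ≤ k → k < ps.length →
      a2 * b * ps.getD k 0 * ps.getD k 0 ≤ n → a2 * b * ps.getD j 0 * ps.getD j 0 ≤ n := by
    intro j k hjk hk hq
    have hcj : 0 ≤ ps.getD j 0 := by
      rw [List.getD_eq_getElem ps 0 (by omega)]
      exact h0 _ (List.getElem_mem _)
    exact pvMono n a2 b b (ps.getD j 0) (ps.getD k 0) ha2 hb (le_refl b) hcj
      (pvSorted_getD_mono ps hs j k hjk hk) hq
  obtain ⟨hR1, hR2, hR3, hR4⟩ := pvBisect_eq n a2 b ps hmono s (ps.length - s) s ps.length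
    (by omega) (le_refl s) hsl (le_refl _) (fun k hk1 hk2 => by omega)
    (fun k hk1 hk2 h => by omega)
  set R := pvBisect n a2 b ps s ps.length with hRdef
  have htw : ((ps.drop s).takeWhile (fun c => decide (a2 * b * c * c ≤ n))).length = R - s := by
    apply pvTW_len_eq
    · simp only [List.length_drop]; omega
    · intro i hi him
      have hlen : s + i < ps.length := by simp only [List.length_drop] at hi; omega
      rw [List.getElem_drop]
      have := hR3 (s + i) (by omega) (by omega)
      rw [List.getD_eq_getElem ps 0 hlen] at this
      simpa using this
    · intro i hi him
      have hlen : s + i < ps.length := by simp only [List.length_drop] at hi; omega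
      rw [List.getElem_drop]
      have := hR4 (s + i) (by omega) (by omega)
      rw [List.getD_eq_getElem ps 0 hlen] at this
      simpa using this
  have hcn : pvCnt n a2 b ps s = R - s := htw
  omega

lemma pvGsum_zero (n a2 : Int) (ps : List Int) : ∀ (d j : Nat), ps.length - j ≤ d →
    (∀ j', j ≤ j' → j' < ps.length → pvCnt n a2 (ps.getD j' 0) ps (j' + 1) = 0) →
    pvGsum n a2 ps j = 0 := by
  intro d
  induction d with
  | zero =>
    intro j hj _
    unfold pvGsum
    rw [dif_neg (by omega)]
  | succ d ih =>
    intro j hj hz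
    unfold pvGsum
    by_cases h : j < ps.length
    · rw [dif_pos h, hz j (le_refl j) h,
        ih (j + 1) (by omega) (fun j' h1 h2 => hz j' (by omega) h2)]
      simp
    · rw [dif_neg h]

lemma pvMiddleA_eq (n a : Int) (ps : List Int) : ∀ (d j : Nat) (count : Int),
    ps.length - j ≤ d →
    pvMiddleA n a ps j count = count + pvGsum n (a * a) ps j := by
  intro d
  induction d with
  | zero =>
    intro j count hj
    unfold pvMiddleA pvGsum
    rw [dif_neg (by omega), dif_neg (by omega)]
    ring
  | succ d ih =>
    intro j count hj
    unfold pvMiddleA pvGsum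
    by_cases h : j < ps.length
    · rw [dif_pos h, dif_pos h]
      dsimp only
      rw [pvInnerA_eq n a ps[j] ps (ps.length - (j + 1)) (j + 1) count (by omega),
        ih (j + 1) _ (by omega), List.getD_eq_getElem ps 0 h]
      ring
    · rw [dif_neg h, dif_neg h]; ring

lemma pvMiddleB_eq (n a2 : Int) (ps : List Int) (hs : ps.Pairwise (· ≤ ·))
    (h0 : ∀ x ∈ ps, 0 ≤ x) (ha2 : 0 ≤ a2) : ∀ (d j : Nat) (count : Int),
    ps.length - j ≤ d →
    pvMiddleB n a2 ps j count = count + pvGsum n a2 ps j := by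
  intro d
  induction d with
  | zero =>
    intro j count hj
    unfold pvMiddleB pvGsum
    rw [dif_neg (by omega), dif_neg (by omega)]
    ring
  | succ d ih =>
    intro j count hj
    unfold pvMiddleB
    by_cases h : j < ps.length
    · rw [dif_pos h]
      have hbj : 0 ≤ ps[j] := h0 _ (List.getElem_mem _)
      by_cases hbr : j + 1 < ps.length ∧ a2 * ps[j] * ps.getD (j + 1) 0 * ps.getD (j + 1) 0 > n
      · rw [if_pos hbr]
        have hz : pvGsum n a2 ps j = 0 := by
          apply pvGsum_zero n a2 ps (ps.length - j) j (le_refl _)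
          intro j' hjj' hj'
          unfold pvCnt
          by_cases hlast : j' + 1 < ps.length
          · have hdrop : ps.drop (j' + 1) = ps[j' + 1] :: ps.drop (j' + 2) :=
              List.drop_eq_getElem_cons hlast
            have hfail : ¬ a2 * ps.getD j' 0 * ps[j' + 1] * ps[j' + 1] ≤ n := by
              intro hq
              apply absurd hbr.2
              simp only [not_lt]
              have h1 : ps[j] ≤ ps.getD j' 0 := by
                have := pvSorted_getD_mono ps hs j j' hjj' hj'
                rwa [List.getD_eq_getElem ps 0 h] at this
              have h2 : ps.getD (j + 1) 0 ≤ ps[j' + 1] := by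
                have := pvSorted_getD_mono ps hs (j + 1) (j' + 1) (by omega) hlast
                rwa [List.getD_eq_getElem ps 0 hlast] at this
              have hc0 : 0 ≤ ps.getD (j + 1) 0 := by
                rw [List.getD_eq_getElem ps 0 (by omega : j + 1 < ps.length)]
                exact h0 _ (List.getElem_mem _)
              exact pvMono n a2 ps[j] (ps.getD j' 0) (ps.getD (j + 1) 0) ps[j' + 1]
                ha2 hbj h1 hc0 h2 hq
            simp only [hdrop, List.takeWhile_cons, decide_eq_true_eq]
            rw [if_neg hfail]
            simp
          · simp [List.drop_eq_nil_of_le (by omega : ps.length ≤ j' + 1)]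
        rw [hz]; ring
      · rw [if_neg hbr]
        have hcnt := pvBisect_cnt n a2 ps[j] ps hs h0 ha2 hbj (j + 1) (by omega)
        rw [ih (j + 1) _ (by omega), hcnt]
        have hgs : pvGsum n a2 ps j
            = (pvCnt n a2 (ps.getD j 0) ps (j + 1) : Int) + pvGsum n a2 ps (j + 1) := by
          rw [pvGsum, dif_pos h]
        rw [hgs, List.getD_eq_getElem ps 0 h]
        push_cast
        ring
    · rw [dif_neg h]
      unfold pvGsum
      rw [dif_neg h]
      ring

lemma pvOuter_eq (n : Int) (ps : List Int) (hs : ps.Pairwise (· ≤ ·))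
    (h0 : ∀ x ∈ ps, 0 ≤ x) : ∀ (d i : Nat) (count : Int), ps.length - i ≤ d →
    pvOuterA n ps i count = pvOuterB n ps i count := by
  intro d
  induction d with
  | zero =>
    intro i count hi
    unfold pvOuterA pvOuterB
    rw [dif_neg (by omega), dif_neg (by omega)]
  | succ d ih =>
    intro i count hi
    unfold pvOuterA pvOuterB
    by_cases h : i < ps.length
    · rw [dif_pos h, dif_pos h]
      dsimp only
      rw [pvMiddleA_eq n ps[i] ps (ps.length - (i + 1)) (i + 1) count (by omega),
        pvMiddleB_eq n (ps[i] * ps[i]) ps hs h0 (mul_self_nonneg _)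
          (ps.length - (i + 1)) (i + 1) count (by omega),
        ih (i + 1) _ (by omega)]
    · rw [dif_neg h, dif_neg h]

lemma pvSieve_sorted (n : Int) : (sieve_of_eratosthenes n).Pairwise (· ≤ ·) := by
  unfold sieve_of_eratosthenes
  exact ((PySem.List.pairwise_lt_pyRange_one 0 (n + 1)).imp le_of_lt).filter _

lemma pvSieve_nonneg (n : Int) : ∀ x ∈ sieve_of_eratosthenes n, 0 ≤ x := by
  intro x hx
  unfold sieve_of_eratosthenes at hx
  have := List.mem_of_mem_filter hx
  exact ((PySem.List.mem_pyRange_one).mp this).1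

-- ===== VERDICT (by name: the statement is the Claim_ definition above) =====
theorem count_prime_combinations_spec : Claim_equal_count_prime_combinations := by
  intro n _ _
  unfold Spec_count_prime_combinations count_prime_combinations count_prime_combinations_alt
  exact pvOuter_eq n (sieve_of_eratosthenes n) (pvSieve_sorted n) (pvSieve_nonneg n)
    (sieve_of_eratosthenes n).length 0 0 (by omega)
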